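-- pv_equiv track=rewrite | github.com/soumyaiitkgp/modelServer | nltkServer/trainCommentClassification.py | findFeatures
-- ===== SOURCE A (Python) =====
-- def findFeatures(document,features):
--     featureDict = {}
--     for f in features:
--         featureDict[f] = 0
--
--     for w in document:
--         if w in features:
--             featureDict[w] += 1
--
--     return featureDict
-- ===== SOURCE B (Python) =====
-- def findFeatures(document, features):
--     return {f: document.count(f) for f in features}
-- ===== Notes on version B (the rewrite author's own statement) =====
-- stated objective: simpler
-- what changed: Replaces A's two passes (zero-init dict then an accumulating scan over the document with a membership test) by a one-line dict comprehension over the features, counting each feature's occurrences in the document directly.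
import Mathlib
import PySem

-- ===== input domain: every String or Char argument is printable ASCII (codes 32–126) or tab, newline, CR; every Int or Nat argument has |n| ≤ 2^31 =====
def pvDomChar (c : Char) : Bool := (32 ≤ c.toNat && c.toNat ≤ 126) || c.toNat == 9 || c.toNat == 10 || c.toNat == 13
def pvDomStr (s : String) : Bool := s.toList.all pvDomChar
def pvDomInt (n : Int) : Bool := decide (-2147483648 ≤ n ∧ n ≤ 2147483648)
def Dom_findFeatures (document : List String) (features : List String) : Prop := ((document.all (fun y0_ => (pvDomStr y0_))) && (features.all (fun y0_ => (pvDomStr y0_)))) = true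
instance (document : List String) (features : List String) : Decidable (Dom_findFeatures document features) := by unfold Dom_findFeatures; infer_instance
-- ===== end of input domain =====

-- B replaces A's zero-init-then-accumulate document scan by a direct per-feature count (simpler, one comprehension).


-- ===== PORT A =====
-- featureDict = {}; for f in features: featureDict[f] = 0
-- for w in document: if w in features: featureDict[w] += 1   (d[w] += 1 ported as insert w (getD w 0 + 1); the key always exists)
def findFeatures (document : List String) (features : List String) : List (String × Int) :=
  let d0 : PySem.Dict String Int := features.foldl (fun d f => d.insert f (0:Int)) PySem.Dict.empty
  let d := document.foldl (fun d w => if features.contains w then d.insert w (d.getD w 0 + 1) else d) d0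
  d.items

-- ===== PORT B =====
-- return {f: document.count(f) for f in features}
def findFeatures_alt (document : List String) (features : List String) : List (String × Int) :=
  (features.foldl (fun d f => d.insert f ((document.count f : Int))) PySem.Dict.empty).items

-- ===== PRECONDITION & SPEC =====
def Spec_findFeatures (document : List String) (features : List String) (out : List (String × Int)) : Prop := out = findFeatures_alt document features
instance (document : List String) (features : List String) (out : List (String × Int)) : Decidable (Spec_findFeatures document features out) := by unfold Spec_findFeatures; infer_instance

-- ===== CLAIM (what is proved, stated in full; the proofs are below) =====
def Claim_equal_findFeatures : Prop := ∀ (document : List String) (features : List String), Dom_findFeatures document features → Spec_findFeatures document features (findFeatures document features)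

-- ===== LEMMAS AND PROOFS =====

-- a fold of inserts whose values do not read the dict: the final lookup is the value function (or untouched)
lemma getD_foldl_insert_fn (l : List String) (v : String → Int) (d : PySem.Dict String Int) (k : String) :
    (l.foldl (fun d f => d.insert f (v f)) d).getD k 0 = if k ∈ l then v k else d.getD k 0 := by
  induction l using List.reverseRecOn generalizing d with
  | nil => simp
  | append_singleton xs x ih =>
      rw [List.foldl_append]
      simp only [List.foldl_cons, List.foldl_nil, PySem.Dict.getD_insert, ih, List.mem_append,
        List.mem_singleton]
      by_cases hx : k = x <;> by_cases hm : k ∈ xs <;> simp [hx, hm]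

-- keys of either build are exactly the distinct features (in order)
lemma keysA_eq (document features : List String) :
    ((document.foldl (fun d w => if features.contains w then d.insert w (d.getD w 0 + 1) else d)
        (features.foldl (fun d f => d.insert f (0:Int)) PySem.Dict.empty)).keys)
      = PySem.Set.ofList features := by
  rw [← List.foldl_filter]
  rw [PySem.Dict.keys_foldl_insert, PySem.Dict.keys_foldl_insert]
  simp only [PySem.Dict.keys_empty, PySem.Set.update_nil_left]
  rw [PySem.Set.update_eq_append_filter]
  have h : (PySem.Set.ofList (document.filter features.contains)).filter
      (fun y => !(PySem.Set.contains (PySem.Set.ofList features) y)) = [] := by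
    rw [List.filter_eq_nil_iff]
    intro x hx
    have hxf : x ∈ features := by
      simpa using List.of_mem_filter ((PySem.Set.mem_ofList _ _).1 hx)
    simp [PySem.Set.mem_ofList, hxf]
  rw [h, List.append_nil]

theorem findFeatures_spec_aux (document features : List String) :
    findFeatures document features = findFeatures_alt document features := by
  unfold findFeatures findFeatures_alt
  simp only []
  set dA := (document.foldl (fun d w => if features.contains w then d.insert w (d.getD w 0 + 1) else d)
      (features.foldl (fun d f => d.insert f (0:Int)) PySem.Dict.empty)) with hdA
  set dB := (features.foldl (fun d f => d.insert f ((document.count f : Int))) PySem.Dict.empty) with hdB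
  have hkA : dA.keys = PySem.Set.ofList features := keysA_eq document features
  have hkB : dB.keys = PySem.Set.ofList features := by
    rw [hdB, PySem.Dict.keys_foldl_insert]
    simp [PySem.Set.update_nil_left]
  have hndA : dA.keys.Nodup := by rw [hkA]; exact PySem.Set.nodup_ofList _
  have hndB : dB.keys.Nodup := by rw [hkB]; exact PySem.Set.nodup_ofList _
  rw [PySem.Dict.items_eq_map_keys dA hndA 0, PySem.Dict.items_eq_map_keys dB hndB 0, hkA, hkB]
  apply List.map_congr_left
  intro k hk
  have hkf : k ∈ features := (PySem.Set.mem_ofList _ _).1 hk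
  have hA : dA.getD k 0 = (document.count k : Int) := by
    rw [hdA, ← List.foldl_filter]
    rw [PySem.Dict.getD_foldl_insert_add_one]
    rw [getD_foldl_insert_fn features (fun _ => 0)]
    rw [List.count_filter (by simpa using hkf)]
    simp [hkf]
  have hB : dB.getD k 0 = (document.count k : Int) := by
    rw [hdB, getD_foldl_insert_fn]
    simp [hkf]
  rw [hA, hB]

-- ===== VERDICT (by name: the statement is the Claim_ definition above) =====
theorem findFeatures_spec : Claim_equal_findFeatures := by
  intro document features _
  exact findFeatures_spec_aux document features
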